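-- pv_equiv track=rewrite | github.com/cezar667/soomei.cc | api/services/custom_domain_service.py | normalize_domain_name
-- ===== SOURCE A (Python) =====
-- def normalize_domain_name(value: str) -> str:
--     v = (value or "").strip().lower()
--     if not v:
--         return ""
--     if "://" in v:
--         v = v.split("://", 1)[1]
--     for sep in ("/", "?", "#"):
--         if sep in v:
--             v = v.split(sep, 1)[0]
--     if ":" in v:
--         v = v.split(":", 1)[0]
--     return v.strip().strip(".")
-- ===== SOURCE B (Python) =====
-- def normalize_domain_name(value: str) -> str:
--     v = (value or "").strip().lower()
--     out = []
--     cut = False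
--     scheme_seen = False
--     i = 0
--     n = len(v)
--     while i < n:
--         if not scheme_seen and v[i:i + 3] == "://":
--             scheme_seen = True
--             out = []
--             cut = False
--             i += 3
--             continue
--         if not cut:
--             if v[i] in "/?#:":
--                 cut = True
--             else:
--                 out.append(v[i])
--         i += 1
--     return "".join(out).strip().strip(".")
-- ===== Notes on version B (the rewrite author's own statement) =====
-- stated objective: alternative
-- what changed: Replaces A's staged split passes (scheme split, then four split(sep,1)[0] cuts) with a single left-to-right character state machine that accumulates host characters, stops at the first delimiter, and resets its accumulator once when it walks over the first '://'.
import Mathlib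
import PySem

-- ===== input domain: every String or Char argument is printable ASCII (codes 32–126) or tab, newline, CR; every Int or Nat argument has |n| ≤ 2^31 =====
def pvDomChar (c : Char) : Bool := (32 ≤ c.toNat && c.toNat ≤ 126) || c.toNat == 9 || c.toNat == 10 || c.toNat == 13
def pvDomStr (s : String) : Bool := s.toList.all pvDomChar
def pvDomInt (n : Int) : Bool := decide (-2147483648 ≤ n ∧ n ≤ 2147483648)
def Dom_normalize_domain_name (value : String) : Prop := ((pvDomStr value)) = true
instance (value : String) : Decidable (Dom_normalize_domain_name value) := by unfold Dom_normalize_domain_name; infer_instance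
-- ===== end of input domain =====

-- B replaces A's staged split passes by ONE left-to-right state machine over the characters
-- (accumulate host chars, stop at the first delimiter, reset once at the first '://');
-- same return value, similar cost (alternative decomposition).

-- ===== PORT A =====
-- Literal port of A: strip/lower, empty guard, '://' split keeping piece [1], then
-- split(sep,1)[0] for '/', '?', '#' in order, then for ':', finally strip().strip('.').
-- The `.getD` defaults are unreachable: split's sep is never empty and the indexed
-- piece always exists under the preceding `in` guard (Python raises nowhere here).
def normalize_domain_name (value : String) : String :=
  let v := PySem.Str.lower (PySem.Str.strip value)
  if v = "" then ""
  else
    let v := if PySem.Str.isIn "://" v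
      then (PySem.List.pyGet? ((PySem.Str.splitMax? v "://" 1).getD []) 1).getD ""
      else v
    let v := ["/", "?", "#"].foldl
      (fun v sep => if PySem.Str.isIn sep v
        then (PySem.List.pyGet? ((PySem.Str.splitMax? v sep 1).getD []) 0).getD ""
        else v) v
    let v := if PySem.Str.isIn ":" v
      then (PySem.List.pyGet? ((PySem.Str.splitMax? v ":" 1).getD []) 0).getD ""
      else v
    PySem.Str.stripChars (PySem.Str.strip v) "."

-- ===== PORT B =====
-- B's while loop, transcribed as recursion on the remaining characters.
-- State: out = accumulated host chars (reversed), cut = a delimiter was seen,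
-- seen = the (first) '://' was already consumed.  'v[i:i+3] == "://"' is
-- 'c = ':' ∧ rest.take 2 = ['/', '/']' (Python slices clamp, take clamps the same way).
def pvGo : List Char → List Char → Bool → Bool → List Char
  | [], out, _cut, _seen => out.reverse
  | c :: rest, out, cut, seen =>
    if seen = false ∧ c = ':' ∧ rest.take 2 = ['/', '/'] then
      pvGo (rest.drop 2) [] false true
    else if cut = true then
      pvGo rest out cut seen
    else if PySem.Chars.isIn [c] "/?#:".toList then
      pvGo rest out true seen
    else
      pvGo rest (c :: out) cut seen
termination_by l _ _ _ => l.length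
decreasing_by all_goals simp [List.length_drop] <;> omega

def normalize_domain_name_alt (value : String) : String :=
  let v := PySem.Str.lower (PySem.Str.strip value)
  PySem.Str.stripChars (PySem.Str.strip (String.ofList (pvGo v.toList [] false false))) "."

-- ===== PRECONDITION & SPEC =====
def Spec_normalize_domain_name (value : String) (out : String) : Prop := out = normalize_domain_name_alt value
instance (value : String) (out : String) : Decidable (Spec_normalize_domain_name value out) := by unfold Spec_normalize_domain_name; infer_instance

-- ===== CLAIM (what is proved, stated in full; the proofs are below) =====
def Claim_equal_normalize_domain_name : Prop := ∀ (value : String), Dom_normalize_domain_name value → Spec_normalize_domain_name value (normalize_domain_name value)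

-- ===== LEMMAS AND PROOFS =====

-- index of the first occurrence of sep in l (as a prefix position), if any
def pvOcc? (sep : List Char) : List Char → Option Nat
  | [] => if sep.isPrefixOf [] then some 0 else none
  | c :: rest => if sep.isPrefixOf (c :: rest) then some 0 else (pvOcc? sep rest).map (· + 1)

theorem pv_go_mzero (sep : List Char) (fuel : Nat) (l cur : List Char) (acc : List (List Char)) :
    PySem.Chars.splitOnMax.go sep fuel 0 l cur acc = ((cur.reverse ++ l) :: acc).reverse := by
  cases fuel <;> cases l <;> simp [PySem.Chars.splitOnMax.go]

theorem pv_go_one (sep : List Char) (hsep : sep ≠ []) :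
    ∀ (l : List Char) (fuel : Nat) (cur : List Char) (acc : List (List Char)), l.length < fuel →
    PySem.Chars.splitOnMax.go sep fuel 1 l cur acc =
      acc.reverse ++ (match pvOcc? sep l with
        | some j => [cur.reverse ++ l.take j, l.drop (j + sep.length)]
        | none => [cur.reverse ++ l]) := by
  intro l
  induction l with
  | nil =>
    intro fuel cur acc hf
    cases fuel with
    | zero => omega
    | succ f =>
      have : sep.isPrefixOf ([] : List Char) = false := by
        cases sep with
        | nil => exact absurd rfl hsep
        | cons a t => rfl
      simp [PySem.Chars.splitOnMax.go, pvOcc?, this]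
  | cons c rest ih =>
    intro fuel cur acc hf
    cases fuel with
    | zero => omega
    | succ f =>
      by_cases hp : sep.isPrefixOf (c :: rest) = true
      · simp [PySem.Chars.splitOnMax.go, hp, pv_go_mzero, pvOcc?]
      · have hf' : rest.length < f := by simpa using hf
        rw [show PySem.Chars.splitOnMax.go sep (f+1) 1 (c :: rest) cur acc =
              PySem.Chars.splitOnMax.go sep f 1 rest (c :: cur) acc by
            simp [PySem.Chars.splitOnMax.go, hp]]
        rw [ih f (c :: cur) acc hf']
        simp only [pvOcc?, hp, if_false, Bool.false_eq_true]
        cases h : pvOcc? sep rest with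
        | none => simp
        | some j => simp [List.take_succ_cons, List.drop_succ_cons, Nat.add_right_comm]

theorem pv_find_go (sep : List Char) (hsep : sep ≠ []) :
    ∀ (l : List Char) (k : Nat),
    PySem.Chars.find.go sep l k =
      (match pvOcc? sep l with
        | some j => ((k + j : Nat) : Int)
        | none => -1) := by
  intro l
  induction l with
  | nil =>
    intro k
    have h1 : sep.isEmpty = false := by cases sep with | nil => exact absurd rfl hsep | cons a t => rfl
    have h2 : sep.isPrefixOf ([] : List Char) = false := by
      cases sep with | nil => exact absurd rfl hsep | cons a t => rfl
    simp [PySem.Chars.find.go, pvOcc?, h1, h2]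
  | cons c rest ih =>
    intro k
    by_cases hp : sep.isPrefixOf (c :: rest) = true
    · simp [PySem.Chars.find.go, pvOcc?, hp]
    · rw [show PySem.Chars.find.go sep (c :: rest) k = PySem.Chars.find.go sep rest (k + 1) by
        simp [PySem.Chars.find.go, hp]]
      rw [ih (k + 1)]
      simp only [pvOcc?, hp, if_false, Bool.false_eq_true]
      cases h : pvOcc? sep rest with
      | none => simp
      | some j => simp; ring

theorem pv_splitOnMax_one (sep : List Char) (hsep : sep ≠ []) (l : List Char) :
    PySem.Chars.splitOnMax l sep 1 =
      (match pvOcc? sep l with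
        | some j => [l.take j, l.drop (j + sep.length)]
        | none => [l]) := by
  rw [show PySem.Chars.splitOnMax l sep 1 =
        PySem.Chars.splitOnMax.go sep (l.length + 1) 1 l [] [] by
      simp [PySem.Chars.splitOnMax]]
  rw [pv_go_one sep hsep l (l.length + 1) [] [] (by omega)]
  cases h : pvOcc? sep l <;> simp

theorem pv_isIn_occ (sep : List Char) (hsep : sep ≠ []) (l : List Char) :
    PySem.Chars.isIn sep l = (pvOcc? sep l).isSome := by
  unfold PySem.Chars.isIn PySem.Chars.find
  rw [pv_find_go sep hsep l 0]
  cases h : pvOcc? sep l with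
  | none => simp
  | some j => simp

theorem pv_occ_single (c : Char) (l : List Char) :
    (match pvOcc? [c] l with | some j => l.take j | none => l)
      = l.takeWhile (fun x => x != c) := by
  induction l with
  | nil => simp [pvOcc?]
  | cons c' rest ih =>
    by_cases hc : c = c'
    · subst hc
      have hp : ([c] : List Char).isPrefixOf (c :: rest) = true := by simp [List.isPrefixOf]
      simp [pvOcc?, hp, List.takeWhile]
    · have hp : ([c] : List Char).isPrefixOf (c' :: rest) = false := by
        simp [List.isPrefixOf]; intro h; exact hc (by simp [h])
      have hne : (c' != c) = true := by simp [bne]; intro h; exact hc (by simp [h])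
      simp only [pvOcc?, hp, Bool.false_eq_true, if_false, List.takeWhile_cons, hne, if_true]
      rw [← ih]
      cases h : pvOcc? [c] rest <;> simp

-- A step: "if sep in s: s = s.split(sep,1)[0]" for a one-char sep cuts at the first c.
theorem pv_Astep (sep : String) (c : Char) (h : sep.toList = [c]) (s : String) :
    (if PySem.Str.isIn sep s
      then (PySem.List.pyGet? ((PySem.Str.splitMax? s sep 1).getD []) 0).getD ""
      else s) = String.ofList (s.toList.takeWhile (fun x => x != c)) := by
  have hne : ([c] : List Char) ≠ [] := by simp
  unfold PySem.Str.isIn PySem.Str.splitMax? PySem.Chars.splitMax?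
  rw [h, pv_isIn_occ _ hne, pv_splitOnMax_one _ hne]
  have hts := pv_occ_single c s.toList
  cases hocc : pvOcc? [c] s.toList with
  | none =>
    rw [hocc] at hts
    simp only [hocc, Option.isSome_none, Bool.false_eq_true, if_false]
    rw [← hts, String.ofList_toList]
  | some j =>
    rw [hocc] at hts
    simp only [hocc, Option.isSome_some, if_true]
    simp [PySem.List.pyGet?, PySem.List.pyIdx?, hts]

-- A's '://' branch, expressed through the first occurrence position.
theorem pv_Ascheme (s : String) :
    (if PySem.Str.isIn "://" s
      then (PySem.List.pyGet? ((PySem.Str.splitMax? s "://" 1).getD []) 1).getD ""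
      else s)
    = (match pvOcc? "://".toList s.toList with
        | some j => String.ofList (s.toList.drop (j + 3))
        | none => s) := by
  have hne : ("://".toList : List Char) ≠ [] := by decide
  unfold PySem.Str.isIn PySem.Str.splitMax? PySem.Chars.splitMax?
  rw [pv_isIn_occ _ hne, pv_splitOnMax_one _ hne]
  cases hocc : pvOcc? ("://".toList) s.toList with
  | none => simp
  | some j => simp [PySem.List.pyGet?, PySem.List.pyIdx?]

theorem pv_isIn_single (c : Char) (l : List Char) :
    PySem.Chars.isIn [c] l = true ↔ c ∈ l := by
  rw [PySem.Chars.isIn_iff_infix]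
  constructor
  · intro hinf; exact hinf.mem (by simp)
  · intro hm
    obtain ⟨p, q, rfl⟩ := List.append_of_mem hm
    exact ⟨p, q, by simp⟩

-- A's four successive cuts equal one cut at the earliest delimiter.
theorem pv_chain (l : List Char) :
    ((((l.takeWhile (fun x => x != '/')).takeWhile (fun x => x != '?')).takeWhile
        (fun x => x != '#')).takeWhile (fun x => x != ':'))
      = l.takeWhile (fun c => !(PySem.Chars.isIn [c] "/?#:".toList)) := by
  induction l with
  | nil => simp
  | cons c rest ih =>
    have hs : "/?#:".toList = ['/', '?', '#', ':'] := rfl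
    rw [hs] at ih ⊢
    by_cases hc : c ∈ ['/', '?', '#', ':']
    · have : c = '/' ∨ c = '?' ∨ c = '#' ∨ c = ':' := by simpa using hc
      rcases this with rfl | rfl | rfl | rfl <;>
        simp [List.takeWhile_cons, (by decide : PySem.Chars.isIn ['/'] ['/', '?', '#', ':'] = true),
          (by decide : PySem.Chars.isIn ['?'] ['/', '?', '#', ':'] = true),
          (by decide : PySem.Chars.isIn ['#'] ['/', '?', '#', ':'] = true),
          (by decide : PySem.Chars.isIn [':'] ['/', '?', '#', ':'] = true)]
    · have hin : PySem.Chars.isIn [c] ['/', '?', '#', ':'] = false := by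
        cases h : PySem.Chars.isIn [c] ['/', '?', '#', ':']
        · rfl
        · exact absurd ((pv_isIn_single c _).mp h) hc
      have h1 : (c != '/') = true := by simp [bne]; rintro rfl; exact hc (by simp)
      have h2 : (c != '?') = true := by simp [bne]; rintro rfl; exact hc (by simp)
      have h3 : (c != '#') = true := by simp [bne]; rintro rfl; exact hc (by simp)
      have h4 : (c != ':') = true := by simp [bne]; rintro rfl; exact hc (by simp)
      simp [List.takeWhile_cons, h1, h2, h3, h4, hin, ih]

-- the machine's scheme test is exactly '"://" is a prefix here'
theorem pv_prefix_iff (c : Char) (rest : List Char) :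
    (c = ':' ∧ rest.take 2 = ['/', '/']) ↔ ("://".toList).isPrefixOf (c :: rest) = true := by
  have hs : "://".toList = [':', '/', '/'] := rfl
  rw [hs, List.isPrefixOf_iff_prefix, List.prefix_iff_eq_take]
  constructor
  · rintro ⟨rfl, h⟩; simp [List.take, h]
  · intro h
    have := h.symm
    simp [List.take] at this
    exact ⟨this.1, this.2⟩

-- machine after a cut, scheme consumed: nothing more is added
theorem pvGo_cut (l : List Char) : ∀ out, pvGo l out true true = out.reverse := by
  induction l with
  | nil => intro out; simp [pvGo]
  | cons c rest ih => intro out; simp [pvGo, ih]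

-- machine with scheme consumed, no cut yet: take up to the first delimiter
theorem pvGo_seen (l : List Char) : ∀ out, pvGo l out false true
    = out.reverse ++ l.takeWhile (fun c => !(PySem.Chars.isIn [c] "/?#:".toList)) := by
  induction l with
  | nil => intro out; simp [pvGo]
  | cons c rest ih =>
    intro out
    cases h : PySem.Chars.isIn [c] ['/', '?', '#', ':'] with
    | true => simp [pvGo, h, pvGo_cut, List.takeWhile_cons]
    | false => simp [pvGo, h, ih, List.takeWhile_cons]

-- machine before the scheme: full characterisation through the first '://' occurrence
theorem pvGo_unseen (l : List Char) : ∀ out cut, pvGo l out cut false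
    = (match pvOcc? "://".toList l with
       | some j => (l.drop (j + 3)).takeWhile (fun c => !(PySem.Chars.isIn [c] "/?#:".toList))
       | none => if cut then out.reverse
                 else out.reverse ++ l.takeWhile (fun c => !(PySem.Chars.isIn [c] "/?#:".toList))) := by
  induction l with
  | nil =>
    intro out cut
    have hp : ("://".toList).isPrefixOf ([] : List Char) = false := by decide
    cases cut <;> simp [pvGo, pvOcc?, hp]
  | cons c rest ih =>
    intro out cut
    by_cases hc : c = ':' ∧ rest.take 2 = ['/', '/']
    · have hp : ("://".toList).isPrefixOf (c :: rest) = true := (pv_prefix_iff c rest).mp hc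
      have hocc : pvOcc? "://".toList (c :: rest) = some 0 := by
        simp only [pvOcc?, hp, if_true]
      rw [show pvGo (c :: rest) out cut false = pvGo (rest.drop 2) [] false true by
            simp [pvGo, hc]]
      rw [pvGo_seen, hocc]
      simp [List.drop_succ_cons]
    · have hp : ("://".toList).isPrefixOf (c :: rest) = false := by
        cases h : ("://".toList).isPrefixOf (c :: rest)
        · rfl
        · exact absurd ((pv_prefix_iff c rest).mpr h) hc
      have hocc : pvOcc? "://".toList (c :: rest) = (pvOcc? "://".toList rest).map (· + 1) := by
        simp only [pvOcc?, hp, Bool.false_eq_true, if_false]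
      cases cut with
      | true =>
        rw [show pvGo (c :: rest) out true false = pvGo rest out true false by
              simp [pvGo, hc]]
        rw [ih out true, hocc]
        cases h : pvOcc? "://".toList rest with
        | none => simp
        | some j => simp [List.drop_succ_cons, Nat.add_right_comm]
      | false =>
        cases hd : PySem.Chars.isIn [c] ['/', '?', '#', ':'] with
        | true =>
          rw [show pvGo (c :: rest) out false false = pvGo rest out true false by
                simp [pvGo, hc, hd]]
          rw [ih out true, hocc]
          cases h : pvOcc? "://".toList rest with
          | none => simp [List.takeWhile_cons, hd]
          | some j => simp [List.drop_succ_cons, Nat.add_right_comm]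
        | false =>
          rw [show pvGo (c :: rest) out false false = pvGo rest (c :: out) false false by
                simp [pvGo, hc, hd]]
          rw [ih (c :: out) false, hocc]
          cases h : pvOcc? "://".toList rest with
          | none => simp [List.takeWhile_cons, hd]
          | some j => simp [List.drop_succ_cons, Nat.add_right_comm]

-- the whole else-branch of A equals B's machine expression
theorem pv_core (v : String) :
    PySem.Str.stripChars (PySem.Str.strip
      ((fun v2 =>
        if PySem.Str.isIn ":" v2
        then (PySem.List.pyGet? ((PySem.Str.splitMax? v2 ":" 1).getD []) 0).getD ""
        else v2)
      (["/", "?", "#"].foldl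
        (fun w sep => if PySem.Str.isIn sep w
          then (PySem.List.pyGet? ((PySem.Str.splitMax? w sep 1).getD []) 0).getD ""
          else w)
        (if PySem.Str.isIn "://" v
          then (PySem.List.pyGet? ((PySem.Str.splitMax? v "://" 1).getD []) 1).getD ""
          else v)))) "."
    = PySem.Str.stripChars (PySem.Str.strip (String.ofList (pvGo v.toList [] false false))) "." := by
  rw [pv_Ascheme, pvGo_unseen]
  cases hocc : pvOcc? "://".toList v.toList with
  | none =>
    beta_reduce
    rw [List.foldl_cons, List.foldl_cons, List.foldl_cons, List.foldl_nil]
    rw [pv_Astep "/" '/' (by decide), pv_Astep "?" '?' (by decide),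
        pv_Astep "#" '#' (by decide), pv_Astep ":" ':' (by decide)]
    simp only [String.toList_ofList]
    rw [pv_chain]
    simp
  | some j =>
    beta_reduce
    rw [List.foldl_cons, List.foldl_cons, List.foldl_cons, List.foldl_nil]
    rw [pv_Astep "/" '/' (by decide), pv_Astep "?" '?' (by decide),
        pv_Astep "#" '#' (by decide), pv_Astep ":" ':' (by decide)]
    simp only [String.toList_ofList]
    rw [pv_chain]

-- ===== VERDICT (by name: the statement is the Claim_ definition above) =====
theorem normalize_domain_name_spec : Claim_equal_normalize_domain_name := by
  intro value _
  unfold Spec_normalize_domain_name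
  unfold normalize_domain_name normalize_domain_name_alt
  by_cases hv : PySem.Str.lower (PySem.Str.strip value) = ""
  · rw [hv]
    simp [pvGo]
    decide
  · rw [if_neg hv]
    exact pv_core (PySem.Str.lower (PySem.Str.strip value))
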